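-- pv_equiv track=rewrite | github.com/etschgi1/Datenstrukturen-und-Algorithmen-1-2 | Ex3/ex3_template.py | count_vectorizer
-- ===== SOURCE A (Python) =====
-- def count_vectorizer(texts, k=1):
--     """Returns all unique features of 'text' and their frequency. Frequencies
--     are sorted in descending order. Features follow the sorting order of
--     frequencies."""
--     y = []
--     c = []
--     # TODO begin
--     entries = 0
--     vals = {}
--     for text in texts:
--         counter, len_ = 0, len(text)
--         while counter <= (len_-k):  # info to avoid running index over array bound
--             word = " ".join(text[counter:(counter+k)]
--                             ) if k != 1 else text[counter]
--             try:
--                 vals[word] += 1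
--             except KeyError:
--                 vals[word] = 1
--             counter += 1
--         entries += counter
--     y, c = list(vals.keys()), list(vals.values())
--     # check if already sorted
--     arrlen_ = len(y)
--     if arrlen_ == entries:  # info already sorted fast return
--         return y, c
--
--     def merge_sort(words, weights, start, end):
--         if start < end:
--             mid = int((start+end)/2)
--             merge_sort(words, weights, start, mid)
--             merge_sort(words, weights, mid+1, end)
--             return merge_(words, weights, start, mid, end)
--         else:
--             return words, weights
--
--     def merge_(words, weights, start, mid, end):
--         left_arr, right_arr = [], []
--         for left in range(start, mid+1):  # range-stop is exclusive in python
--             left_arr.append((words[left], weights[left]))  # append ist O(1)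
--         for right in range(mid+1, end+1):
--             right_arr.append((words[right], weights[right]))
--         left_arr.append(("", 0))  # 0 is per design not possible either a word
--         right_arr.append(("", 0))  # is in the list (count = 1) or not
--         left, right = 0, 0
--         for counter in range(start, end+1):
--             if left_arr[left][1] >= right_arr[right][1]:  # order
--                 words[counter], weights[counter] = left_arr[left][0], left_arr[left][1]
--                 left += 1
--             else:
--                 words[counter], weights[counter] = right_arr[right][0], right_arr[right][1]
--                 right += 1
--         return words, weights
--     y, c = merge_sort(y, c, 0, arrlen_-1)  # call functions
--     # TODO end
--     return y, c
-- ===== SOURCE B (Python) =====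
-- def count_vectorizer(texts, k=1):
--     """Returns all unique features of 'text' and their frequency. Frequencies
--     are sorted in descending order. Features follow the sorting order of
--     frequencies."""
--     vals = {}
--     for text in texts:
--         counter, len_ = 0, len(text)
--         while counter <= (len_ - k):
--             word = " ".join(text[counter:(counter + k)]
--                             ) if k != 1 else text[counter]
--             vals[word] = vals.get(word, 0) + 1
--             counter += 1
--     # bucket sort on frequency: stable descending order comes out directly
--     buckets = {}
--     maxf = 0
--     for word, cnt in vals.items():
--         buckets.setdefault(cnt, []).append(word)
--         if cnt > maxf:
--             maxf = cnt
--     y, c = [], []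
--     for f in range(maxf, 0, -1):
--         for word in buckets.get(f, []):
--             y.append(word)
--             c.append(f)
--     return y, c
-- ===== Notes on version B (the rewrite author's own statement) =====
-- stated objective: alternative
-- what changed: The counting loop is kept, but the hand-written recursive index-based merge sort (plus its all-unique early-return shortcut) is replaced by a bucket/counting sort on frequency: words are grouped into per-frequency buckets in one pass over the dict and emitted walking frequencies from the maximum down, which reproduces the stable descending order directly.
import Mathlib
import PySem

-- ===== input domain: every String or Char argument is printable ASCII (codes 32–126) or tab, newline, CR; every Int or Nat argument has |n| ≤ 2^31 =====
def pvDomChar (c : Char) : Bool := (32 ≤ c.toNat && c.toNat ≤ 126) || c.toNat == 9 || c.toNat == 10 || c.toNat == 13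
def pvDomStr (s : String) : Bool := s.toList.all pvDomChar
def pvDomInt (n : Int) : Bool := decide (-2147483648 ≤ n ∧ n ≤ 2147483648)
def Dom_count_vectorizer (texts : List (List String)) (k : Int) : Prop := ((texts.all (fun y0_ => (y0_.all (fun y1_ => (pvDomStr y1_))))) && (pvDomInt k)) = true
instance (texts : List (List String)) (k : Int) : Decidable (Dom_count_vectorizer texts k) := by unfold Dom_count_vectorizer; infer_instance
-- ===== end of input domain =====

-- B replaces A's hand-written recursive merge sort (and its all-unique early return)
-- by a bucket sort on frequency; the counting loop is unchanged.

-- ===== PORT A =====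
-- shared by both ports (the same line of Python occurs in both): the k-gram at
-- position `counter` of `text` — '" ".join(text[counter:counter+k]) if k != 1
-- else text[counter]'.  The k == 1 index is always in range (counter ≤ len-1),
-- so pyGetD's default is never used.
def pvWordAt (k : Int) (text : List String) (counter : Int) : String :=
  if k ≠ 1 then PySem.Str.join " " (PySem.List.slice text (some counter) (some (counter + k)))
  else PySem.List.pyGetD text counter ""

-- 'try: vals[word] += 1 except KeyError: vals[word] = 1' (same line in both ports)
def pvBump (vals : PySem.Dict String Int) (word : String) : PySem.Dict String Int :=
  vals.insert word (vals.getD word 0 + 1)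

-- A's merge_ : merges the (sorted) rows [start..mid] and [mid+1..end] of l in
-- place, words and weights moved together as pairs.  Python indexes
-- left_arr/right_arr and writes words/weights only in range on every call the
-- program makes; pyGetD/pySetD are exact there.
def pvMergeRow (l : List (String × Int)) (start mid en : Int) : List (String × Int) :=
  let leftArr := (PySem.List.pyRange start (mid + 1) 1).map
      (fun i => PySem.List.pyGetD l i ("", 0)) ++ [("", 0)]
  let rightArr := (PySem.List.pyRange (mid + 1) (en + 1) 1).map
      (fun i => PySem.List.pyGetD l i ("", 0)) ++ [("", 0)]
  ((PySem.List.pyRange start (en + 1) 1).foldl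
    (fun (st : List (String × Int) × Int × Int) counter =>
      if (PySem.List.pyGetD rightArr st.2.2 ("", 0)).2 ≤ (PySem.List.pyGetD leftArr st.2.1 ("", 0)).2
      then (PySem.List.pySetD st.1 counter (PySem.List.pyGetD leftArr st.2.1 ("", 0)), st.2.1 + 1, st.2.2)
      else (PySem.List.pySetD st.1 counter (PySem.List.pyGetD rightArr st.2.2 ("", 0)), st.2.1, st.2.2 + 1))
    (l, 0, 0)).1

-- A's merge_sort; 'int((start+end)/2)' truncates toward zero = Int.tdiv here.
-- The Python recursion is bounded by the segment size, given as structural fuel.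
def pvMergeSort (fuel : Nat) (l : List (String × Int)) (start en : Int) : List (String × Int) :=
  match fuel with
  | 0 => l
  | fuel + 1 =>
    if start < en then
      let mid := Int.tdiv (start + en) 2
      let l1 := pvMergeSort fuel l start mid
      let l2 := pvMergeSort fuel l1 (mid + 1) en
      pvMergeRow l2 start mid en
    else l

def count_vectorizer (texts : List (List String)) (k : Int) : List String × List Int :=
  -- counting loop: the while loop runs counter = 0 .. len-k, i.e. over
  -- range(0, len-k+1); after it 'entries += counter' adds that range's length
  let st := texts.foldl
    (fun (st : Int × PySem.Dict String Int) text =>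
      (st.1 + ((PySem.List.pyRange 0 ((text.length : Int) - k + 1) 1).length : Int),
       (PySem.List.pyRange 0 ((text.length : Int) - k + 1) 1).foldl
         (fun vals counter => pvBump vals (pvWordAt k text counter)) st.2))
    ((0 : Int), PySem.Dict.empty)
  let entries := st.1
  let vals := st.2
  let y := vals.keys
  let arrlen : Int := (y.length : Int)
  if arrlen = entries then (y, vals.values)
  else
    -- merge_sort(y, c, 0, arrlen-1); words/weights are kept as the pair list vals.items
    let srt := pvMergeSort (arrlen.toNat + 1) vals.items 0 (arrlen - 1)
    (srt.map Prod.fst, srt.map Prod.snd)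

-- ===== PORT B =====
def count_vectorizer_alt (texts : List (List String)) (k : Int) : List String × List Int :=
  -- identical counting loop (no 'entries' bookkeeping in B)
  let vals := texts.foldl
    (fun vals text =>
      (PySem.List.pyRange 0 ((text.length : Int) - k + 1) 1).foldl
        (fun vals counter => pvBump vals (pvWordAt k text counter)) vals)
    PySem.Dict.empty
  -- one pass over vals.items(): group words into per-frequency buckets, track max frequency
  let bm := vals.items.foldl
    (fun (bm : PySem.Dict Int (List String) × Int) p =>
      (bm.1.modify p.2 [] (fun ws => ws ++ [p.1]),
       if bm.2 < p.2 then p.2 else bm.2))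
    (PySem.Dict.empty, 0)
  -- emit buckets walking frequencies maxf, maxf-1, …, 1
  let yc := (PySem.List.pyRange bm.2 0 (-1)).foldl
    (fun (yc : List String × List Int) f =>
      (bm.1.getD f []).foldl (fun yc word => (yc.1 ++ [word], yc.2 ++ [f])) yc)
    ([], [])
  yc

-- ===== PRECONDITION & SPEC =====
def Spec_count_vectorizer (texts : List (List String)) (k : Int) (out : List String × List Int) : Prop := out = count_vectorizer_alt texts k
instance (texts : List (List String)) (k : Int) (out : List String × List Int) : Decidable (Spec_count_vectorizer texts k out) := by unfold Spec_count_vectorizer; infer_instance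

-- ===== CLAIM (what is proved, stated in full; the proofs are below) =====
def Claim_equal_count_vectorizer : Prop := ∀ (texts : List (List String)) (k : Int), Dom_count_vectorizer texts k → Spec_count_vectorizer texts k (count_vectorizer texts k)

-- ===== LEMMAS AND PROOFS =====

-- the flat list of all k-grams, in generation order
def pvWords (texts : List (List String)) (k : Int) : List String :=
  texts.flatMap (fun text => (PySem.List.pyRange 0 ((text.length : Int) - k + 1) 1).map (pvWordAt k text))

def pvItems (texts : List (List String)) (k : Int) : List (String × Int) :=
  (PySem.Dict.counter (pvWords texts k)).items

def pvMaxf (texts : List (List String)) (k : Int) : Int :=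
  ((pvItems texts k).map Prod.snd).foldl max 0

def pvF (texts : List (List String)) (k : Int) : List Int :=
  PySem.List.pyRange (pvMaxf texts k) 0 (-1)

-- canonical stable-descending form: for each frequency f of F (descending),
-- the items of that frequency in first-insertion order
def pvC (F : List Int) (l : List (String × Int)) : List (String × Int) :=
  F.flatMap (fun f => l.filter (fun p => p.2 == f))

-- functional left-biased descending merge (what A's sentinel loop computes)
def pvMergeF : List (String × Int) → List (String × Int) → List (String × Int)
  | [], ys => ys
  | x :: xs, [] => x :: xs
  | x :: xs, y :: ys =>
    if y.2 ≤ x.2 then x :: pvMergeF xs (y :: ys) else y :: pvMergeF (x :: xs) ys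
termination_by xs ys => xs.length + ys.length

-- sequential in-place writes starting at pos
def pvWrite : List (String × Int) → Nat → List (String × Int) → List (String × Int)
  | l, _, [] => l
  | l, pos, v :: vs => pvWrite (l.set pos v) (pos + 1) vs

lemma pvMergeF_nil_right (xs : List (String × Int)) : pvMergeF xs [] = xs := by
  cases xs <;> simp [pvMergeF]

lemma pvMergeF_length (xs ys : List (String × Int)) :
    (pvMergeF xs ys).length = xs.length + ys.length := by
  induction xs, ys using pvMergeF.induct with
  | case1 ys => simp [pvMergeF]
  | case2 x xs => simp [pvMergeF]
  | case3 x xs y ys h ih => simp [pvMergeF, h, ih]; omega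
  | case4 x xs y ys h ih => simp [pvMergeF, h, ih]; omega

lemma pvMergeF_left (xs ys rest : List (String × Int))
    (h : ∀ x ∈ xs, ∀ y ∈ ys, y.2 ≤ x.2) :
    pvMergeF (xs ++ rest) ys = xs ++ pvMergeF rest ys := by
  induction xs generalizing ys with
  | nil => simp
  | cons x xs ih =>
    cases ys with
    | nil => simp [pvMergeF_nil_right]
    | cons y ys =>
      have hxy : y.2 ≤ x.2 := h x (by simp) y (by simp)
      simp only [List.cons_append, pvMergeF, hxy, if_true]
      rw [ih _ (fun a ha b hb => h a (List.mem_cons_of_mem _ ha) b hb)]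

lemma pvMergeF_right (xs ys rest : List (String × Int))
    (h : ∀ y ∈ ys, ∀ x ∈ xs, x.2 < y.2) :
    pvMergeF xs (ys ++ rest) = ys ++ pvMergeF xs rest := by
  induction ys generalizing xs with
  | nil => simp
  | cons y ys ih =>
    cases xs with
    | nil => simp [pvMergeF]
    | cons x xs =>
      have hxy : x.2 < y.2 := h y (by simp) x (by simp)
      simp only [List.cons_append, pvMergeF, not_le.2 hxy, if_false]
      rw [ih _ (fun a ha b hb => h a (List.mem_cons_of_mem _ ha) b hb)]

lemma pvC_mem {p : String × Int} (F : List Int) (l : List (String × Int)) :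
    p ∈ pvC F l → p ∈ l ∧ p.2 ∈ F := by
  intro hp
  simp only [pvC, List.mem_flatMap, List.mem_filter, beq_iff_eq] at hp
  obtain ⟨f, hf, hpl, rfl⟩ := hp
  exact ⟨hpl, hf⟩

lemma pvC_perm (F : List Int) (l : List (String × Int)) (hnd : F.Nodup)
    (hmem : ∀ p ∈ l, p.2 ∈ F) : (pvC F l).Perm l := by
  induction F generalizing l with
  | nil =>
    cases l with
    | nil => simp [pvC]
    | cons p t => exact absurd (hmem p (by simp)) (by simp)
  | cons f F ih =>
    have hnd' : F.Nodup := hnd.of_cons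
    have hf : f ∉ F := by simp [List.nodup_cons] at hnd; exact hnd.1
    have hrw : pvC F l = pvC F (l.filter (fun p => !(p.2 == f))) := by
      simp only [pvC]
      refine List.flatMap_congr (fun g hg => ?_)
      rw [List.filter_filter]
      refine List.filter_congr (fun p _ => ?_)
      by_cases hpf : p.2 = f
      · have hfg : ¬ f = g := by rintro rfl; exact hf hg
        simp [hpf, hfg]
      · simp [hpf]
    have hsub : ∀ p ∈ l.filter (fun p => !(p.2 == f)), p.2 ∈ F := by
      intro p hp
      simp only [List.mem_filter, Bool.not_eq_eq_eq_not, Bool.not_true, beq_eq_false_iff_ne] at hp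
      rcases hmem p hp.1 with h1
      simp only [List.mem_cons] at h1
      rcases h1 with rfl | h1
      · exact absurd rfl hp.2
      · exact h1
    have h1 : pvC (f :: F) l = l.filter (fun p => p.2 == f) ++ pvC F l := by
      simp only [pvC, List.flatMap_cons]
    rw [h1, hrw]
    exact ((ih _ hnd' hsub).append_left _).trans (List.filter_append_perm _ l)

lemma pvMergeF_pvC (F : List Int) (hF : F.Pairwise (· > ·)) (a b : List (String × Int)) :
    pvMergeF (pvC F a) (pvC F b) = pvC F (a ++ b) := by
  induction F with
  | nil => simp [pvC, pvMergeF]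
  | cons f F ih =>
    have hlt : ∀ g ∈ F, g < f := fun g hg => (List.pairwise_cons.1 hF).1 g hg
    have hF' : F.Pairwise (· > ·) := (List.pairwise_cons.1 hF).2
    have hCa : ∀ p ∈ pvC F a, p.2 < f := fun p hp => hlt _ (pvC_mem F a hp).2
    have hCb : ∀ p ∈ pvC F b, p.2 < f := fun p hp => hlt _ (pvC_mem F b hp).2
    have hAf : ∀ p ∈ a.filter (fun p => p.2 == f), p.2 = f := by
      intro p hp; simpa using (List.mem_filter.1 hp).2
    have hBf : ∀ p ∈ b.filter (fun p => p.2 == f), p.2 = f := by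
      intro p hp; simpa using (List.mem_filter.1 hp).2
    have step1 : pvMergeF (a.filter (fun p => p.2 == f) ++ pvC F a)
        (b.filter (fun p => p.2 == f) ++ pvC F b)
        = a.filter (fun p => p.2 == f) ++
            pvMergeF (pvC F a) (b.filter (fun p => p.2 == f) ++ pvC F b) := by
      refine pvMergeF_left _ _ _ (fun x hx y hy => ?_)
      rcases List.mem_append.1 hy with hy | hy
      · rw [hAf x hx, hBf y hy]
      · rw [hAf x hx]; exact le_of_lt (hCb y hy)
    have step2 : pvMergeF (pvC F a) (b.filter (fun p => p.2 == f) ++ pvC F b)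
        = b.filter (fun p => p.2 == f) ++ pvMergeF (pvC F a) (pvC F b) := by
      refine pvMergeF_right _ _ _ (fun y hy x hx => ?_)
      rw [hBf y hy]; exact hCa x hx
    simp only [pvC, List.flatMap_cons] at *
    rw [step1, step2, ih hF']
    simp [List.filter_append, List.append_assoc]

lemma pvWrite_eq (vs : List (String × Int)) : ∀ (l : List (String × Int)) (pos : Nat),
    pos + vs.length ≤ l.length →
    pvWrite l pos vs = l.take pos ++ vs ++ l.drop (pos + vs.length) := by
  induction vs with
  | nil => intro l pos h; simp [pvWrite]
  | cons v vs ih =>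
    intro l pos h
    simp only [List.length_cons] at h
    have hpos : pos < l.length := by omega
    have htake : (l.set pos v).take (pos + 1) = l.take pos ++ [v] := by
      rw [List.set_eq_take_cons_drop v hpos, List.take_append]
      simp [List.length_take, Nat.min_eq_left (le_of_lt hpos)]
    have hdrop : (l.set pos v).drop (pos + 1 + vs.length) = l.drop (pos + 1 + vs.length) := by
      exact List.drop_set_of_lt (by omega)
    rw [pvWrite, ih _ _ (by simp only [List.length_set]; omega), htake, hdrop]
    have harith : pos + 1 + vs.length = pos + (vs.length + 1) := by omega
    rw [harith]
    simp

lemma pvReadRange (l : List (String × Int)) (a b : Int) (ha : 0 ≤ a) (hab : a ≤ b)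
    (hb : b ≤ (l.length : Int)) :
    (PySem.List.pyRange a b 1).map (fun i => PySem.List.pyGetD l i ("", 0))
      = (l.drop a.toNat).take (b - a).toNat := by
  rw [PySem.List.pyRange_one, List.map_map]
  refine List.ext_getElem ?_ (fun i h1 h2 => ?_)
  · simp only [List.length_map, List.length_range, List.length_take, List.length_drop]
    omega
  · have hi : i < (b - a).toNat := by simpa using h1
    have hlen : a.toNat + i < l.length := by omega
    simp only [List.getElem_map, List.getElem_range, Function.comp_apply,
      List.getElem_take, List.getElem_drop]
    rw [show a + ((i : Nat) : Int) = ((a.toNat + i : Nat) : Int) from by omega]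
    rw [PySem.List.pyGetD_natCast, List.getD_eq_getElem _ _ hlen]

-- A's merge loop writes out pvMergeF of the unconsumed parts of X and Y
lemma pvMergeLoop (X Y : List (String × Int))
    (hX : ∀ p ∈ X, 1 ≤ p.2) (hY : ∀ p ∈ Y, 1 ≤ p.2) :
    ∀ (cnt : Nat) (i j : Nat) (l : List (String × Int)) (pos : Int), 0 ≤ pos →
    i ≤ X.length → j ≤ Y.length → cnt = (X.length - i) + (Y.length - j) →
    pos.toNat + cnt ≤ l.length →
    ((PySem.List.pyRange pos (pos + (cnt : Int)) 1).foldl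
      (fun (st : List (String × Int) × Int × Int) counter =>
        if (PySem.List.pyGetD (Y ++ [("", 0)]) st.2.2 ("", 0)).2
              ≤ (PySem.List.pyGetD (X ++ [("", 0)]) st.2.1 ("", 0)).2
        then (PySem.List.pySetD st.1 counter (PySem.List.pyGetD (X ++ [("", 0)]) st.2.1 ("", 0)), st.2.1 + 1, st.2.2)
        else (PySem.List.pySetD st.1 counter (PySem.List.pyGetD (Y ++ [("", 0)]) st.2.2 ("", 0)), st.2.1, st.2.2 + 1))
      (l, (i : Int), (j : Int))).1
    = pvWrite l pos.toNat (pvMergeF (X.drop i) (Y.drop j)) := by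
  intro cnt
  induction cnt with
  | zero =>
    intro i j l pos hpos hi hj hcnt hlen
    have hi' : i = X.length := by omega
    have hj' : j = Y.length := by omega
    subst hi' hj'
    rw [show pos + ((0 : Nat) : Int) = pos by push_cast; ring]
    rw [PySem.List.pyRange_one_eq_nil (le_refl pos)]
    simp [pvMergeF, pvWrite, List.drop_length]
  | succ cnt IH =>
    intro i j l pos hpos hi hj hcnt hlen
    rw [PySem.List.pyRange_one_cons (by push_cast; omega), List.foldl_cons]
    rw [show pos + ((cnt + 1 : Nat) : Int) = (pos + 1) + ((cnt : Nat) : Int) by push_cast; ring]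
    have hsetl : ∀ v : String × Int, PySem.List.pySetD l pos v = l.set pos.toNat v :=
      fun v => PySem.List.pySetD_of_nonneg l v hpos
    have hposn : (pos + 1).toNat = pos.toNat + 1 := by omega
    by_cases hiX : i < X.length
    · have hgX : (X ++ [("", 0)]).getD i ("", 0) = X[i] := by
        rw [List.getD_eq_getElem _ _ (by simp; omega)]; simp [hiX]
      by_cases hjY : j < Y.length
      · -- both rows still hold real elements
        have hgY : (Y ++ [("", 0)]).getD j ("", 0) = Y[j] := by
          rw [List.getD_eq_getElem _ _ (by simp; omega)]; simp [hjY]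
        simp only [PySem.List.pyGetD_natCast, hgX, hgY, hsetl]
        by_cases hcmp : Y[j].2 ≤ X[i].2
        · rw [if_pos hcmp]
          have hrec := IH (i + 1) j (l.set pos.toNat X[i]) (pos + 1) (by omega) (by omega)
            (by omega) (by omega) (by simp only [List.length_set]; omega)
          rw [Nat.cast_add, Nat.cast_one] at hrec
          rw [hrec, hposn]
          have hm : pvMergeF (X.drop i) (Y.drop j) = X[i] :: pvMergeF (X.drop (i + 1)) (Y.drop j) := by
            rw [List.drop_eq_getElem_cons hiX, List.drop_eq_getElem_cons hjY]
            simp only [pvMergeF, hcmp, if_true]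
          rw [hm]; rfl
        · rw [if_neg hcmp]
          have hrec := IH i (j + 1) (l.set pos.toNat Y[j]) (pos + 1) (by omega) (by omega)
            (by omega) (by omega) (by simp only [List.length_set]; omega)
          rw [Nat.cast_add, Nat.cast_one] at hrec
          rw [hrec, hposn]
          have hm : pvMergeF (X.drop i) (Y.drop j) = Y[j] :: pvMergeF (X.drop i) (Y.drop (j + 1)) := by
            rw [List.drop_eq_getElem_cons hiX, List.drop_eq_getElem_cons hjY]
            simp only [pvMergeF, hcmp, if_false]
          rw [hm]; rfl
      · -- right row exhausted: sentinel 0 loses against X[i].2 ≥ 1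
        have hj' : j = Y.length := by omega
        subst hj'
        have hgY : (Y ++ [("", 0)]).getD Y.length ("", 0) = ("", 0) := by
          rw [List.getD_eq_getElem _ _ (by simp)]; simp
        have hx1 : 1 ≤ X[i].2 := hX _ (List.getElem_mem _)
        simp only [PySem.List.pyGetD_natCast, hgX, hgY, hsetl]
        rw [if_pos (by omega : (("", (0 : Int))).2 ≤ X[i].2)]
        have hrec := IH (i + 1) Y.length (l.set pos.toNat X[i]) (pos + 1) (by omega) (by omega)
          (le_refl _) (by omega) (by simp only [List.length_set]; omega)
        rw [Nat.cast_add, Nat.cast_one] at hrec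
        rw [hrec, hposn, List.drop_length, pvMergeF_nil_right, pvMergeF_nil_right,
          List.drop_eq_getElem_cons hiX]
        rfl
    · -- left row exhausted: sentinel 0 ≤ Y[j].2, right element is copied
      have hi' : i = X.length := by omega
      subst hi'
      have hjY : j < Y.length := by omega
      have hgX : (X ++ [("", 0)]).getD X.length ("", 0) = ("", 0) := by
        rw [List.getD_eq_getElem _ _ (by simp)]; simp
      have hgY : (Y ++ [("", 0)]).getD j ("", 0) = Y[j] := by
        rw [List.getD_eq_getElem _ _ (by simp; omega)]; simp [hjY]
      have hy1 : 1 ≤ Y[j].2 := hY _ (List.getElem_mem _)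
      simp only [PySem.List.pyGetD_natCast, hgX, hgY, hsetl]
      rw [if_neg (by simp; omega)]
      have hrec := IH X.length (j + 1) (l.set pos.toNat Y[j]) (pos + 1) (by omega) (le_refl _)
        (by omega) (by omega) (by simp only [List.length_set]; omega)
      rw [Nat.cast_add, Nat.cast_one] at hrec
      rw [hrec, hposn, List.drop_length]
      simp only [pvMergeF]
      rw [List.drop_eq_getElem_cons hjY]
      rfl

lemma pvMergeRow_eq (Pre X Y Suf : List (String × Int))
    (hX1 : ∀ p ∈ X, 1 ≤ p.2) (hY1 : ∀ p ∈ Y, 1 ≤ p.2) :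
    pvMergeRow (Pre ++ X ++ Y ++ Suf) (Pre.length : Int)
      ((Pre.length : Int) + X.length - 1) ((Pre.length : Int) + X.length + Y.length - 1)
    = Pre ++ pvMergeF X Y ++ Suf := by
  have hlen : (Pre ++ X ++ Y ++ Suf).length = Pre.length + X.length + Y.length + Suf.length := by
    simp; omega
  have e1 : ((Pre.length : Int) + X.length - 1) + 1 = (Pre.length : Int) + X.length := by ring
  have e2 : ((Pre.length : Int) + X.length + Y.length - 1) + 1
      = (Pre.length : Int) + ((X.length + Y.length : Nat) : Int) := by push_cast; ring
  have hL : (PySem.List.pyRange (Pre.length : Int) ((Pre.length : Int) + X.length) 1).map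
      (fun i => PySem.List.pyGetD (Pre ++ X ++ Y ++ Suf) i ("", 0)) = X := by
    rw [pvReadRange _ _ _ (by positivity) (by omega) (by rw [hlen]; push_cast; omega)]
    rw [show ((Pre.length : Int) + X.length - Pre.length).toNat = X.length by omega,
      Int.toNat_natCast]
    rw [List.append_assoc, List.append_assoc, List.drop_left]
    exact List.take_left ..
  have hR : (PySem.List.pyRange ((Pre.length : Int) + X.length)
        ((Pre.length : Int) + ((X.length + Y.length : Nat) : Int)) 1).map
      (fun i => PySem.List.pyGetD (Pre ++ X ++ Y ++ Suf) i ("", 0)) = Y := by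
    rw [pvReadRange _ _ _ (by positivity) (by push_cast; omega) (by rw [hlen]; push_cast; omega)]
    rw [show ((Pre.length : Int) + ((X.length + Y.length : Nat) : Int)
        - ((Pre.length : Int) + X.length)).toNat = Y.length by omega]
    rw [show ((Pre.length : Int) + X.length).toNat = (Pre ++ X).length by
      rw [List.length_append]; omega]
    rw [show Pre ++ X ++ Y ++ Suf = (Pre ++ X) ++ (Y ++ Suf) by simp]
    rw [List.drop_left, List.take_left]
  simp only [pvMergeRow, e1, e2, hL, hR]
  have hloop := pvMergeLoop X Y hX1 hY1 (X.length + Y.length) 0 0 (Pre ++ X ++ Y ++ Suf)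
    (Pre.length : Int) (by positivity) (by omega) (by omega) (by omega)
    (by rw [hlen]; simp; omega)
  simp only [List.drop_zero, Nat.cast_zero, Int.toNat_natCast] at hloop
  rw [hloop]
  rw [pvWrite_eq _ _ _ (by rw [hlen, pvMergeF_length]; omega)]
  rw [pvMergeF_length]
  rw [show Pre.length + (X.length + Y.length) = ((Pre ++ X) ++ Y).length by
    rw [List.length_append, List.length_append]; omega]
  rw [show Pre ++ X ++ Y ++ Suf = ((Pre ++ X) ++ Y) ++ Suf by simp]
  rw [List.drop_left]
  rw [show (((Pre ++ X) ++ Y) ++ Suf).take Pre.length = Pre by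
    rw [show ((Pre ++ X) ++ Y) ++ Suf = Pre ++ (X ++ Y ++ Suf) by simp]
    exact List.take_left ..]

lemma pvMergeSort_eq (F : List Int) (hF : F.Pairwise (· > ·)) (hpos : ∀ f ∈ F, 1 ≤ f) :
    ∀ (fuel : Nat) (Pre M Suf : List (String × Int)), M.length ≤ fuel →
    (∀ p ∈ M, p.2 ∈ F) →
    pvMergeSort fuel (Pre ++ M ++ Suf) (Pre.length : Int) ((Pre.length : Int) + M.length - 1)
      = Pre ++ pvC F M ++ Suf := by
  have hnd : F.Nodup := hF.imp (fun h => ne_of_gt h)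
  intro fuel
  induction fuel with
  | zero =>
    intro Pre M Suf hfuel hmem
    have hM : M = [] := List.eq_nil_of_length_eq_zero (by omega)
    subst hM
    simp [pvMergeSort, pvC]
  | succ fuel IH =>
    intro Pre M Suf hfuel hmem
    simp only [pvMergeSort]
    by_cases hM : 2 ≤ M.length
    · rw [if_pos (by omega)]
      rw [Int.tdiv_eq_ediv_of_nonneg (by omega)]
      set h : Nat := (M.length - 1) / 2 + 1 with hh
      have hh1 : 1 ≤ h := by omega
      have hh2 : h ≤ M.length - 1 := by omega
      have hmid : ((Pre.length : Int) + ((Pre.length : Int) + M.length - 1)) / 2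
          = (Pre.length : Int) + h - 1 := by omega
      rw [hmid]
      have hM1len : (M.take h).length = h := by simp; omega
      have hM2len : (M.drop h).length = M.length - h := by simp
      have hsplit : Pre ++ M ++ Suf = Pre ++ M.take h ++ (M.drop h ++ Suf) := by
        conv_lhs => rw [← List.take_append_drop h M]
        simp only [List.append_assoc]
      rw [hsplit]
      have e1 : (Pre.length : Int) + h - 1 = (Pre.length : Int) + ((M.take h).length : Int) - 1 := by
        rw [hM1len]
      rw [e1, IH Pre (M.take h) (M.drop h ++ Suf) (by omega)
        (fun p hp => hmem p (List.mem_of_mem_take hp))]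
      have hClen : (pvC F (M.take h)).length = h := by
        rw [(pvC_perm F (M.take h) hnd (fun p hp => hmem p (List.mem_of_mem_take hp))).length_eq,
          hM1len]
      have e2 : (Pre.length : Int) + ((M.take h).length : Int) - 1 + 1
          = ((Pre ++ pvC F (M.take h)).length : Int) := by
        rw [List.length_append, hClen, hM1len]; push_cast; ring
      rw [e2]
      have e3 : (Pre.length : Int) + (M.length : Int) - 1
          = ((Pre ++ pvC F (M.take h)).length : Int) + ((M.drop h).length : Int) - 1 := by
        rw [List.length_append, hClen, hM2len]; push_cast; omega
      rw [e3]
      have hsplit2 : Pre ++ pvC F (M.take h) ++ (M.drop h ++ Suf)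
          = (Pre ++ pvC F (M.take h)) ++ M.drop h ++ Suf := by simp
      rw [hsplit2, IH (Pre ++ pvC F (M.take h)) (M.drop h) Suf (by omega)
        (fun p hp => hmem p (List.mem_of_mem_drop hp))]
      -- now the merge row
      have hX1 : ∀ p ∈ pvC F (M.take h), 1 ≤ p.2 :=
        fun p hp => hpos _ (pvC_mem F _ hp).2
      have hY1 : ∀ p ∈ pvC F (M.drop h), 1 ≤ p.2 :=
        fun p hp => hpos _ (pvC_mem F _ hp).2
      have hrow := pvMergeRow_eq Pre (pvC F (M.take h)) (pvC F (M.drop h)) Suf hX1 hY1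
      have hC2len : (pvC F (M.drop h)).length = M.length - h := by
        rw [(pvC_perm F (M.drop h) hnd (fun p hp => hmem p (List.mem_of_mem_drop hp))).length_eq,
          hM2len]
      have e4 : ((Pre ++ pvC F (M.take h)).length : Int) = (Pre.length : Int) + ((pvC F (M.take h)).length : Int) := by
        rw [List.length_append]; push_cast; ring
      have e5 : ((Pre ++ pvC F (M.take h)).length : Int) + ((M.drop h).length : Int) - 1
          = (Pre.length : Int) + ((pvC F (M.take h)).length : Int) + ((pvC F (M.drop h)).length : Int) - 1 := by
        rw [List.length_append, hClen, hC2len, hM2len]; push_cast; omega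
      rw [show (Pre ++ pvC F (M.take h)) ++ pvC F (M.drop h) ++ Suf
          = Pre ++ pvC F (M.take h) ++ pvC F (M.drop h) ++ Suf by simp]
      rw [show (Pre.length : Int) + ((M.take h).length : Int) - 1
          = (Pre.length : Int) + ((pvC F (M.take h)).length : Int) - 1 by rw [hClen, hM1len]]
      rw [e5, hrow, pvMergeF_pvC F hF, List.take_append_drop]
    · rw [if_neg (by omega)]
      rcases M with _ | ⟨p, M'⟩
      · simp [pvC]
      · rcases M' with _ | ⟨q, M''⟩
        · have hp : pvC F [p] = [p] :=
            List.perm_singleton.mp (pvC_perm F [p] hnd (by simpa using hmem p (by simp)))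
          rw [hp]
        · simp at hM

-- counting phase: A's fold is (#k-grams, Counter(words)); B's is its dict part
lemma pvFoldWords (texts : List (List String)) (k : Int) (d : PySem.Dict String Int) :
    texts.foldl (fun vals text =>
        (PySem.List.pyRange 0 ((text.length : Int) - k + 1) 1).foldl
          (fun vals counter => pvBump vals (pvWordAt k text counter)) vals) d
    = (pvWords texts k).foldl pvBump d := by
  rw [pvWords, List.flatMap_def, List.foldl_flatten, List.foldl_map]
  apply PySem.List.foldl_congr_mem
  intro acc text _
  rw [List.foldl_map]

lemma pvValsB (texts : List (List String)) (k : Int) :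
    texts.foldl (fun vals text =>
        (PySem.List.pyRange 0 ((text.length : Int) - k + 1) 1).foldl
          (fun vals counter => pvBump vals (pvWordAt k text counter)) vals) PySem.Dict.empty
    = PySem.Dict.counter (pvWords texts k) := by
  rw [pvFoldWords]
  exact PySem.Dict.foldl_insert_getD_add_one_eq_counter _

lemma pvStA (texts : List (List String)) (k : Int) :
    texts.foldl
      (fun (st : Int × PySem.Dict String Int) text =>
        (st.1 + ((PySem.List.pyRange 0 ((text.length : Int) - k + 1) 1).length : Int),
         (PySem.List.pyRange 0 ((text.length : Int) - k + 1) 1).foldl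
           (fun vals counter => pvBump vals (pvWordAt k text counter)) st.2))
      ((0 : Int), PySem.Dict.empty)
    = (((pvWords texts k).length : Int), PySem.Dict.counter (pvWords texts k)) := by
  rw [PySem.List.foldl_prod_mk
    (f := fun (acc : Int) text =>
      acc + ((PySem.List.pyRange 0 ((text.length : Int) - k + 1) 1).length : Int))
    (g := fun (vals : PySem.Dict String Int) text =>
      (PySem.List.pyRange 0 ((text.length : Int) - k + 1) 1).foldl
        (fun vals counter => pvBump vals (pvWordAt k text counter)) vals)]
  have hlen : ∀ (ts : List (List String)) (a : Int),
      ts.foldl (fun acc text =>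
          acc + ((PySem.List.pyRange 0 ((text.length : Int) - k + 1) 1).length : Int)) a
        = a + ((ts.flatMap (fun text =>
            (PySem.List.pyRange 0 ((text.length : Int) - k + 1) 1).map (pvWordAt k text))).length : Int) := by
    intro ts
    induction ts with
    | nil => intro a; simp
    | cons t ts ih =>
      intro a
      rw [List.foldl_cons, ih, List.flatMap_cons]
      simp only [List.length_append, List.length_map]
      push_cast
      ring
  simp only [Prod.mk.injEq]
  refine ⟨?_, pvValsB texts k⟩
  rw [hlen texts 0, pvWords]
  ring

-- items facts
lemma pvItems_snd_pos (texts : List (List String)) (k : Int) :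
    ∀ p ∈ pvItems texts k, 1 ≤ p.2 := by
  intro p hp
  rw [pvItems, PySem.Dict.items_counter] at hp
  obtain ⟨w, hw, rfl⟩ := List.mem_map.1 hp
  have hmem : w ∈ pvWords texts k := (PySem.Set.mem_ofList _ _).1 hw
  have : 0 < (pvWords texts k).count w := List.count_pos_iff.mpr hmem
  simp only []
  omega

lemma pvItems_snd_le_maxf (texts : List (List String)) (k : Int) :
    ∀ p ∈ pvItems texts k, p.2 ≤ pvMaxf texts k := by
  intro p hp
  exact (PySem.List.le_foldl_max ((pvItems texts k).map Prod.snd) 0).2 _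
    (List.mem_map_of_mem hp)

lemma pvF_pairwise (texts : List (List String)) (k : Int) : (pvF texts k).Pairwise (· > ·) := by
  rw [pvF, PySem.List.pyRange_neg_one]
  refine List.pairwise_map.mpr (List.pairwise_lt_range.imp ?_)
  intro a b hab
  omega

lemma pvF_pos (texts : List (List String)) (k : Int) : ∀ f ∈ pvF texts k, 1 ≤ f := by
  intro f hf
  rw [pvF, PySem.List.pyRange_neg_one] at hf
  obtain ⟨j, hj, rfl⟩ := List.mem_map.1 hf
  rw [List.mem_range] at hj
  omega

lemma pvF_mem (texts : List (List String)) (k : Int) (v : Int) (h1 : 1 ≤ v)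
    (h2 : v ≤ pvMaxf texts k) : v ∈ pvF texts k := by
  rw [pvF, PySem.List.pyRange_neg_one]
  refine List.mem_map.2 ⟨(pvMaxf texts k - v).toNat, List.mem_range.2 (by omega), by omega⟩

-- duplicate-free word list from '#distinct = #total'
lemma pvNodup_of_len (W : List String) (h : (PySem.Set.ofList W).length = W.length) :
    W.Nodup := by
  induction W using List.reverseRecOn with
  | nil => simp
  | append_singleton xs x ih =>
    rw [PySem.Set.ofList_append_singleton, PySem.Set.add_eq_ite] at h
    by_cases hx : x ∈ PySem.Set.ofList xs
    · rw [if_pos hx] at h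
      have := PySem.Set.length_ofList_le (xs := xs)
      simp at h
      omega
    · rw [if_neg hx] at h
      simp only [List.length_append, List.length_singleton] at h
      have hnd := ih (by omega)
      have hxx : x ∉ xs := fun hc => hx ((PySem.Set.mem_ofList _ _).2 hc)
      simp [List.nodup_append, hnd]
      exact fun a ha heq => hxx (heq ▸ ha)

-- B computes the canonical form
lemma pvAlt_eq (texts : List (List String)) (k : Int) :
    count_vectorizer_alt texts k
      = ((pvC (pvF texts k) (pvItems texts k)).map Prod.fst,
         (pvC (pvF texts k) (pvItems texts k)).map Prod.snd) := by
  simp only [count_vectorizer_alt]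
  rw [pvValsB]
  -- split the bucket/maxf loop into its two accumulators
  rw [PySem.List.foldl_prod_mk
    (f := fun (d : PySem.Dict Int (List String)) (p : String × Int) =>
      d.modify p.2 [] (fun ws => ws ++ [p.1]))
    (g := fun (m : Int) (p : String × Int) => if m < p.2 then p.2 else m)]
  -- the running maximum is pvMaxf
  have hmax : (PySem.Dict.counter (pvWords texts k)).items.foldl
      (fun (m : Int) (p : String × Int) => if m < p.2 then p.2 else m) 0 = pvMaxf texts k := by
    rw [PySem.List.foldl_congr_mem _ _ (fun (m : Int) (p : String × Int) => max m p.2) _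
      (fun acc p _ => by by_cases h : acc < p.2 <;> simp [max_def] <;> omega)]
    rw [pvMaxf, pvItems, ← List.foldl_map]
  -- bucket f is the words of frequency f, in insertion order
  have hbucket : ∀ f : Int, ((PySem.Dict.counter (pvWords texts k)).items.foldl
      (fun (d : PySem.Dict Int (List String)) (p : String × Int) =>
        d.modify p.2 [] (fun ws => ws ++ [p.1])) PySem.Dict.empty).getD f []
      = ((pvItems texts k).filter (fun p => p.2 == f)).map Prod.fst := by
    intro f
    rw [show (PySem.Dict.counter (pvWords texts k)).items.foldl
        (fun (d : PySem.Dict Int (List String)) (p : String × Int) =>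
          d.modify p.2 [] (fun ws => ws ++ [p.1])) PySem.Dict.empty
      = ((pvItems texts k).map Prod.swap).foldl
        (fun (d : PySem.Dict Int (List String)) (q : Int × String) =>
          d.modify q.1 [] (fun ws => ws ++ [q.2])) PySem.Dict.empty from by
        rw [List.foldl_map]; rfl]
    rw [PySem.Dict.getD_foldl_modify_append, List.filter_map, List.map_map]
    simp [Function.comp_def]
  rw [hmax]
  -- the emit loop: each bucket appends its words to y and its frequency to c
  have hinner : ∀ (ws : List String) (f : Int) (yc : List String × List Int),
      ws.foldl (fun yc w => (yc.1 ++ [w], yc.2 ++ [f])) yc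
        = (yc.1 ++ ws, yc.2 ++ ws.map (fun _ => f)) := by
    intro ws f yc
    obtain ⟨y, c⟩ := yc
    rw [PySem.List.foldl_prod_mk (f := fun (y : List String) w => y ++ [w])
      (g := fun (c : List Int) (w : String) => c ++ [f])]
    rw [PySem.List.foldl_append_singleton_eq_self, PySem.List.foldl_append_singleton_eq_map]
  rw [PySem.List.foldl_congr_mem _ _
    (fun (yc : List String × List Int) f =>
      (yc.1 ++ ((pvItems texts k).filter (fun p => p.2 == f)).map Prod.fst,
       yc.2 ++ (((pvItems texts k).filter (fun p => p.2 == f)).map Prod.fst).map (fun _ => f))) _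
    (fun yc f _ => by rw [hinner, hbucket])]
  rw [PySem.List.foldl_prod_mk
    (f := fun (y : List String) f => y ++ ((pvItems texts k).filter (fun p => p.2 == f)).map Prod.fst)
    (g := fun (c : List Int) f =>
      c ++ (((pvItems texts k).filter (fun p => p.2 == f)).map Prod.fst).map (fun _ => f))]
  rw [PySem.List.foldl_append_eq_flatMap, PySem.List.foldl_append_eq_flatMap]
  simp only [List.nil_append, Prod.mk.injEq]
  refine ⟨?_, ?_⟩
  · rw [pvC, List.map_flatMap, ← pvF]
  · rw [pvC, List.map_flatMap, ← pvF]
    refine List.flatMap_congr (fun f hf => ?_)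
    rw [List.map_map]
    refine List.map_congr_left (fun p hp => ?_)
    have := (List.mem_filter.1 hp).2
    simp at this ⊢
    omega

-- A computes the canonical form too
lemma pvA_eq (texts : List (List String)) (k : Int) :
    count_vectorizer texts k
      = ((pvC (pvF texts k) (pvItems texts k)).map Prod.fst,
         (pvC (pvF texts k) (pvItems texts k)).map Prod.snd) := by
  simp only [count_vectorizer]
  rw [pvStA]
  have hkeyslen : (PySem.Dict.counter (pvWords texts k)).keys.length = (pvItems texts k).length := by
    simp only [PySem.Dict.keys, pvItems, List.length_map]
  by_cases hcond :
      (((PySem.Dict.counter (pvWords texts k)).keys.length : Nat) : Int) = ((pvWords texts k).length : Int)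
  · rw [if_pos hcond]
    have hnodup : (pvWords texts k).Nodup := pvNodup_of_len _ (by
      have := hcond
      rw [PySem.Dict.keys_counter] at this
      exact_mod_cast this)
    have hone : ∀ p ∈ pvItems texts k, p.2 = 1 := by
      intro p hp
      rw [pvItems, PySem.Dict.items_counter] at hp
      obtain ⟨w, hw, rfl⟩ := List.mem_map.1 hp
      simp [List.count_eq_one_of_mem hnodup ((PySem.Set.mem_ofList _ _).1 hw)]
    have hCitems : pvC (pvF texts k) (pvItems texts k) = pvItems texts k := by
      by_cases hnil : pvItems texts k = []
      · rw [hnil]; simp [pvC]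
      · have hmax1 : pvMaxf texts k = 1 := by
          obtain ⟨p, hp⟩ := List.exists_mem_of_ne_nil _ hnil
          have h1 : (1 : Int) ≤ pvMaxf texts k := by
            have hle := (PySem.List.le_foldl_max ((pvItems texts k).map Prod.snd) 0).2 p.2
              (List.mem_map_of_mem hp)
            rw [hone p hp] at hle
            exact hle
          rcases PySem.List.foldl_max_mem ((pvItems texts k).map Prod.snd) 0 with h | h
          · rw [pvMaxf] at h1 ⊢; omega
          · obtain ⟨q, hq, hq2⟩ := List.mem_map.1 h
            rw [pvMaxf, ← hq2, hone q hq]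
        have hF1 : pvF texts k = [1] := by
          rw [pvF, hmax1, PySem.List.pyRange_neg_one]
          simp
        rw [hF1]
        simp only [pvC, List.flatMap_cons, List.flatMap_nil, List.append_nil]
        exact List.filter_eq_self.mpr (fun p hp => by simp [hone p hp])
    rw [hCitems]
    simp only [PySem.Dict.keys, PySem.Dict.values, pvItems]
  · rw [if_neg hcond]
    have hsort := pvMergeSort_eq (pvF texts k) (pvF_pairwise texts k) (pvF_pos texts k)
      ((pvItems texts k).length + 1) [] (pvItems texts k) [] (by omega)
      (fun p hp => pvF_mem texts k p.2 (pvItems_snd_pos texts k p hp)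
        (pvItems_snd_le_maxf texts k p hp))
    simp only [List.nil_append, List.append_nil, List.length_nil, Nat.cast_zero, zero_add] at hsort
    rw [show (((PySem.Dict.counter (pvWords texts k)).keys.length : Nat) : Int)
        = (((pvItems texts k).length : Nat) : Int) from by rw [hkeyslen]]
    rw [Int.toNat_natCast]
    rw [show (PySem.Dict.counter (pvWords texts k)).items = pvItems texts k from rfl]
    rw [hsort]

-- ===== VERDICT (by name: the statement is the Claim_ definition above) =====
theorem count_vectorizer_spec : Claim_equal_count_vectorizer := by
  intro texts k _
  show count_vectorizer texts k = count_vectorizer_alt texts k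
  rw [pvA_eq, pvAlt_eq]
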